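-- pv_equiv track=rewrite | github.com/astercc518/data-processor-tool | country_operators.py | identify_operator
-- ===== SOURCE A (Python) =====
-- COUNTRY_OPERATORS = {
--     "US": {
--         "name": "美国",
--         "code": "1",
--         "region": "北美洲",
--         "operators": {
--             "Verizon": {
--                 "prefixes": ["201", "202", "203", "205", "206", "207", "208", "209"],
--                 "description": "Verizon Wireless - 美国最大的移动运营商"
--             },
--             "AT&T": {
--                 "prefixes": ["240", "260", "280", "310", "410", "430", "469", "470"],
--                 "description": "AT&T Mobility - 美国第二大移动运营商"
--             },
--             "T-Mobile": {
--                 "prefixes": ["425", "505", "530", "626", "660", "702", "720", "786"],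
--                 "description": "T-Mobile US - 美国第三大移动运营商"
--             }
--         }
--     },
--     "VN": {
--         "name": "越南",
--         "code": "84",
--         "region": "亚洲",
--         "operators": {
--             "Viettel": {
--                 "prefixes": ["86", "96", "97", "98", "32", "33", "34", "35"],
--                 "description": "Viettel Mobile - 越南最大移动运营商"
--             },
--             "VinaPhone": {
--                 "prefixes": ["88", "91", "94", "83", "84", "85"],
--                 "description": "VNPT VinaPhone - 越南第二大移动运营商"
--             },
--             "MobiFone": {
--                 "prefixes": ["89", "90", "93", "70", "76", "77"],
--                 "description": "MobiFone Corporation - 越南老牌移动运营商"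
--             }
--         }
--     },
--     "TH": {
--         "name": "泰国",
--         "code": "66",
--         "region": "亚洲",
--         "operators": {
--             "AIS": {
--                 "prefixes": ["81", "89", "90", "91", "92", "93"],
--                 "description": "Advanced Info Service - 泰国最大移动运营商"
--             },
--             "DTAC": {
--                 "prefixes": ["82", "83", "84", "87", "88"],
--                 "description": "Total Access Communication - 泰国第二大移动运营商"
--             }
--         }
--     },
--     "IN": {
--         "name": "印度",
--         "code": "91",
--         "region": "亚洲",
--         "operators": {
--             "Jio": {
--                 "prefixes": ["60", "61", "62", "63", "70", "71", "72", "73"],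
--                 "description": "Reliance Jio - 印度最大移动运营商"
--             },
--             "Airtel": {
--                 "prefixes": ["78", "79", "80", "81", "82", "83"],
--                 "description": "Bharti Airtel - 印度第二大移动运营商"
--             }
--         }
--     }
-- }
--
-- def get_operators_by_country(country_code):
--     """根据国家代码获取运营商列表"""
--     if country_code in COUNTRY_OPERATORS:
--         return COUNTRY_OPERATORS[country_code]["operators"]
--     return {}
--
-- def identify_operator(country_code, phone_number):
--     """根据手机号识别运营商"""
--     operators = get_operators_by_country(country_code)
--
--     # 移除国家代码
--     country_prefix = COUNTRY_OPERATORS.get(country_code, {}).get("code", "")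
--     if phone_number.startswith(country_prefix):
--         phone_number = phone_number[len(country_prefix):]
--
--     # 尝试匹配运营商
--     for operator_name, operator_data in operators.items():
--         for prefix in operator_data["prefixes"]:
--             if phone_number.startswith(prefix):
--                 return operator_name
--
--     return "未知运营商"
-- ===== SOURCE B (Python) =====
-- # Precomputed per-country index: dial code, uniform prefix length, prefix -> operator.
-- # One dict lookup replaces A's nested scan over operators and prefixes.
-- OPERATOR_INDEX = {
--     "US": ("1", 3, {"201": "Verizon", "202": "Verizon", "203": "Verizon",
--                     "205": "Verizon", "206": "Verizon", "207": "Verizon",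
--                     "208": "Verizon", "209": "Verizon",
--                     "240": "AT&T", "260": "AT&T", "280": "AT&T", "310": "AT&T",
--                     "410": "AT&T", "430": "AT&T", "469": "AT&T", "470": "AT&T",
--                     "425": "T-Mobile", "505": "T-Mobile", "530": "T-Mobile",
--                     "626": "T-Mobile", "660": "T-Mobile", "702": "T-Mobile",
--                     "720": "T-Mobile", "786": "T-Mobile"}),
--     "VN": ("84", 2, {"86": "Viettel", "96": "Viettel", "97": "Viettel",
--                      "98": "Viettel", "32": "Viettel", "33": "Viettel",
--                      "34": "Viettel", "35": "Viettel",
--                      "88": "VinaPhone", "91": "VinaPhone", "94": "VinaPhone",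
--                      "83": "VinaPhone", "84": "VinaPhone", "85": "VinaPhone",
--                      "89": "MobiFone", "90": "MobiFone", "93": "MobiFone",
--                      "70": "MobiFone", "76": "MobiFone", "77": "MobiFone"}),
--     "TH": ("66", 2, {"81": "AIS", "89": "AIS", "90": "AIS", "91": "AIS",
--                      "92": "AIS", "93": "AIS",
--                      "82": "DTAC", "83": "DTAC", "84": "DTAC", "87": "DTAC",
--                      "88": "DTAC"}),
--     "IN": ("91", 2, {"60": "Jio", "61": "Jio", "62": "Jio", "63": "Jio",
--                      "70": "Jio", "71": "Jio", "72": "Jio", "73": "Jio",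
--                      "78": "Airtel", "79": "Airtel", "80": "Airtel",
--                      "81": "Airtel", "82": "Airtel", "83": "Airtel"}),
-- }
--
-- UNKNOWN = "未知运营商"
--
-- def identify_operator(country_code, phone_number):
--     entry = OPERATOR_INDEX.get(country_code)
--     if entry is None:
--         return UNKNOWN
--     code, plen, index = entry
--     if phone_number.startswith(code):
--         phone_number = phone_number[len(code):]
--     return index.get(phone_number[:plen], UNKNOWN)
-- ===== Notes on version B (the rewrite author's own statement) =====
-- stated objective: idiomatic
-- what changed: A's nested loops over operators and their prefix lists (repeated startswith tests) are replaced by a precomputed per-country (dial code, prefix length, prefix->operator) index, so matching becomes one slice plus a single dict lookup.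
import Mathlib
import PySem

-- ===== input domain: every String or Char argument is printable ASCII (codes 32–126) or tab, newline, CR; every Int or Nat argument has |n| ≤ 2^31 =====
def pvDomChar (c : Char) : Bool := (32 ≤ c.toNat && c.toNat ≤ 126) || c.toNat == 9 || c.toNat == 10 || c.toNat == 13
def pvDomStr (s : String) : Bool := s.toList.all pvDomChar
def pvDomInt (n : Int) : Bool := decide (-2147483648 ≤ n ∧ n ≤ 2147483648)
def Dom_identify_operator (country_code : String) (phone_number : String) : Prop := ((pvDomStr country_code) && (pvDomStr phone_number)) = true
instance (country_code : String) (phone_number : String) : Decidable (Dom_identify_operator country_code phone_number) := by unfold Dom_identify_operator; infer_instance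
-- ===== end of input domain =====

-- B replaces A's nested scan over operators and their prefix lists by a precomputed
-- per-country (dial code, prefix length, prefix → operator) index and a single dict lookup
-- on the sliced phone number (objective: idiomatic/alternative; same behaviour proved equal).

-- ===== PORT A =====
structure OpInfo where
  prefixes : List String
  description : String
deriving Repr, DecidableEq

structure CountryInfo where
  cname : String
  code : String
  region : String
  operators : PySem.Dict String OpInfo
deriving Repr, DecidableEq

def COUNTRY_OPERATORS : PySem.Dict String CountryInfo := PySem.Dict.mk [
    ("US", ⟨"美国", "1", "北美洲", PySem.Dict.mk [
      ("Verizon", ⟨["201", "202", "203", "205", "206", "207", "208", "209"], "Verizon Wireless - 美国最大的移动运营商"⟩),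
      ("AT&T", ⟨["240", "260", "280", "310", "410", "430", "469", "470"], "AT&T Mobility - 美国第二大移动运营商"⟩),
      ("T-Mobile", ⟨["425", "505", "530", "626", "660", "702", "720", "786"], "T-Mobile US - 美国第三大移动运营商"⟩)]⟩),
    ("VN", ⟨"越南", "84", "亚洲", PySem.Dict.mk [
      ("Viettel", ⟨["86", "96", "97", "98", "32", "33", "34", "35"], "Viettel Mobile - 越南最大移动运营商"⟩),
      ("VinaPhone", ⟨["88", "91", "94", "83", "84", "85"], "VNPT VinaPhone - 越南第二大移动运营商"⟩),
      ("MobiFone", ⟨["89", "90", "93", "70", "76", "77"], "MobiFone Corporation - 越南老牌移动运营商"⟩)]⟩),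
    ("TH", ⟨"泰国", "66", "亚洲", PySem.Dict.mk [
      ("AIS", ⟨["81", "89", "90", "91", "92", "93"], "Advanced Info Service - 泰国最大移动运营商"⟩),
      ("DTAC", ⟨["82", "83", "84", "87", "88"], "Total Access Communication - 泰国第二大移动运营商"⟩)]⟩),
    ("IN", ⟨"印度", "91", "亚洲", PySem.Dict.mk [
      ("Jio", ⟨["60", "61", "62", "63", "70", "71", "72", "73"], "Reliance Jio - 印度最大移动运营商"⟩),
      ("Airtel", ⟨["78", "79", "80", "81", "82", "83"], "Bharti Airtel - 印度第二大移动运营商"⟩)]⟩)]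

-- `country_code in COUNTRY_OPERATORS` + `COUNTRY_OPERATORS[country_code]["operators"]`:
-- the key is present iff get? returns some, so the match is exact.
def get_operators_by_country (country_code : String) : PySem.Dict String OpInfo :=
  match PySem.Dict.get? COUNTRY_OPERATORS country_code with
  | some ci => ci.operators
  | none => PySem.Dict.empty

-- inner loop `for prefix in operator_data["prefixes"]: if phone_number.startswith(prefix): return …`
def pvScanPrefixes (phone : String) : List String → Bool
  | [] => false
  | p :: ps => if PySem.Str.startswith phone p then true else pvScanPrefixes phone ps

-- outer loop `for operator_name, operator_data in operators.items(): …`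
def pvScanOps (phone : String) : List (String × OpInfo) → Option String
  | [] => none
  | (name, info) :: rest =>
    if pvScanPrefixes phone info.prefixes then some name else pvScanOps phone rest

def identify_operator (country_code : String) (phone_number : String) : String :=
  let operators := get_operators_by_country country_code
  -- COUNTRY_OPERATORS.get(country_code, {}).get("code", "")
  let country_prefix := match PySem.Dict.get? COUNTRY_OPERATORS country_code with
    | some ci => ci.code
    | none => ""
  let phone1 := if PySem.Str.startswith phone_number country_prefix = true
    then PySem.Str.slice phone_number (some (PySem.Str.len country_prefix)) none
    else phone_number
  match pvScanOps phone1 (PySem.Dict.items operators) with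
  | some name => name
  | none => "未知运营商"

-- ===== PORT B =====
def OPERATOR_INDEX : PySem.Dict String (String × Int × PySem.Dict String String) := PySem.Dict.mk [
    ("US", ("1", (3 : Int), PySem.Dict.mk [("201", "Verizon"), ("202", "Verizon"), ("203", "Verizon"), ("205", "Verizon"), ("206", "Verizon"), ("207", "Verizon"), ("208", "Verizon"), ("209", "Verizon"), ("240", "AT&T"), ("260", "AT&T"), ("280", "AT&T"), ("310", "AT&T"), ("410", "AT&T"), ("430", "AT&T"), ("469", "AT&T"), ("470", "AT&T"), ("425", "T-Mobile"), ("505", "T-Mobile"), ("530", "T-Mobile"), ("626", "T-Mobile"), ("660", "T-Mobile"), ("702", "T-Mobile"), ("720", "T-Mobile"), ("786", "T-Mobile")])),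
    ("VN", ("84", (2 : Int), PySem.Dict.mk [("86", "Viettel"), ("96", "Viettel"), ("97", "Viettel"), ("98", "Viettel"), ("32", "Viettel"), ("33", "Viettel"), ("34", "Viettel"), ("35", "Viettel"), ("88", "VinaPhone"), ("91", "VinaPhone"), ("94", "VinaPhone"), ("83", "VinaPhone"), ("84", "VinaPhone"), ("85", "VinaPhone"), ("89", "MobiFone"), ("90", "MobiFone"), ("93", "MobiFone"), ("70", "MobiFone"), ("76", "MobiFone"), ("77", "MobiFone")])),
    ("TH", ("66", (2 : Int), PySem.Dict.mk [("81", "AIS"), ("89", "AIS"), ("90", "AIS"), ("91", "AIS"), ("92", "AIS"), ("93", "AIS"), ("82", "DTAC"), ("83", "DTAC"), ("84", "DTAC"), ("87", "DTAC"), ("88", "DTAC")])),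
    ("IN", ("91", (2 : Int), PySem.Dict.mk [("60", "Jio"), ("61", "Jio"), ("62", "Jio"), ("63", "Jio"), ("70", "Jio"), ("71", "Jio"), ("72", "Jio"), ("73", "Jio"), ("78", "Airtel"), ("79", "Airtel"), ("80", "Airtel"), ("81", "Airtel"), ("82", "Airtel"), ("83", "Airtel")]))]

def identify_operator_alt (country_code : String) (phone_number : String) : String :=
  match PySem.Dict.get? OPERATOR_INDEX country_code with
  | none => "未知运营商"
  | some (code, plen, index) =>
    let phone1 := if PySem.Str.startswith phone_number code = true
      then PySem.Str.slice phone_number (some (PySem.Str.len code)) none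
      else phone_number
    PySem.Dict.getD index (PySem.Str.slice phone1 none (some plen)) "未知运营商"

-- ===== PRECONDITION & SPEC =====
def Spec_identify_operator (country_code : String) (phone_number : String) (out : String) : Prop := out = identify_operator_alt country_code phone_number
instance (country_code : String) (phone_number : String) (out : String) : Decidable (Spec_identify_operator country_code phone_number out) := by unfold Spec_identify_operator; infer_instance

-- ===== CLAIM (what is proved, stated in full; the proofs are below) =====
def Claim_equal_identify_operator : Prop := ∀ (country_code : String) (phone_number : String), Dom_identify_operator country_code phone_number → Spec_identify_operator country_code phone_number (identify_operator country_code phone_number)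

-- ===== LEMMAS AND PROOFS =====

-- `phone.startswith(p)` for a prefix of length n is the same test as `phone[:n] == p`.
-- flatten A's inner boolean prefix chain into the outer if-chain
theorem pv_push {α : Type} (c b : Bool) (v e : α) :
    (if (if c = true then true else b) = true then v else e)
      = if c = true then v else if b = true then v else e := by
  by_cases hc : c = true <;> simp [hc]

theorem pv_match_getD (o : Option String) :
    (match o with | some n => n | none => "未知运营商") = o.getD "未知运营商" := by
  cases o <;> rfl

theorem pv_get?_nil (k : String) :
    (PySem.Dict.mk ([] : List (String × String))).get? k = none := rfl

theorem sw_master (s p : String) (n : Nat) (h : p.toList.length = n) :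
    PySem.Str.startswith s p = (p == PySem.Str.slice s none (some (n : Int))) := by
  have h0 : (0:Int) ≤ (n:Int) := by positivity
  rw [Bool.eq_iff_iff]
  simp only [PySem.Str.startswith_eq, PySem.Chars.startswith_iff, beq_iff_eq,
    ← String.toList_inj, PySem.Str.toList_slice, PySem.Chars.slice_eq_listSlice,
    PySem.List.slice_to _ h0, Int.toNat_natCast, List.prefix_iff_eq_take, h]

theorem sw2 (s p : String) (h : p.toList.length = 2) :
    PySem.Str.startswith s p = (p == PySem.Str.slice s none (some (2 : Int))) := by
  have := sw_master s p 2 h; norm_num at this; exact this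

theorem sw3 (s p : String) (h : p.toList.length = 3) :
    PySem.Str.startswith s p = (p == PySem.Str.slice s none (some (3 : Int))) := by
  have := sw_master s p 3 h; norm_num at this; exact this

set_option maxHeartbeats 1000000 in
theorem case_us (phone : String) : identify_operator "US" phone = identify_operator_alt "US" phone := by
  have e_US : (("US" : String) == "US") = true := by decide
  simp only [identify_operator, identify_operator_alt, get_operators_by_country,
    COUNTRY_OPERATORS, OPERATOR_INDEX, PySem.Dict.get?_mk_cons,
    e_US, if_true]
  generalize (if PySem.Str.startswith phone "1" = true
    then PySem.Str.slice phone (some (PySem.Str.len "1")) none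
    else phone) = t
  simp only [pvScanOps, pvScanPrefixes]
  simp only [sw3 (p := "201") (h := by decide), sw3 (p := "202") (h := by decide), sw3 (p := "203") (h := by decide), sw3 (p := "205") (h := by decide), sw3 (p := "206") (h := by decide), sw3 (p := "207") (h := by decide), sw3 (p := "208") (h := by decide), sw3 (p := "209") (h := by decide), sw3 (p := "240") (h := by decide), sw3 (p := "260") (h := by decide), sw3 (p := "280") (h := by decide), sw3 (p := "310") (h := by decide), sw3 (p := "410") (h := by decide), sw3 (p := "430") (h := by decide), sw3 (p := "469") (h := by decide), sw3 (p := "470") (h := by decide), sw3 (p := "425") (h := by decide), sw3 (p := "505") (h := by decide), sw3 (p := "530") (h := by decide), sw3 (p := "626") (h := by decide), sw3 (p := "660") (h := by decide), sw3 (p := "702") (h := by decide), sw3 (p := "720") (h := by decide), sw3 (p := "786") (h := by decide)]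
  simp only [pv_push, Bool.false_eq_true, if_false]
  simp only [pv_match_getD, PySem.Dict.getD_eq_get?_getD, PySem.Dict.get?_mk_cons, pv_get?_nil]

set_option maxHeartbeats 1000000 in
theorem case_vn (phone : String) : identify_operator "VN" phone = identify_operator_alt "VN" phone := by
  have e_US : (("US" : String) == "VN") = false := by decide
  have e_VN : (("VN" : String) == "VN") = true := by decide
  simp only [identify_operator, identify_operator_alt, get_operators_by_country,
    COUNTRY_OPERATORS, OPERATOR_INDEX, PySem.Dict.get?_mk_cons,
    e_US, e_VN, if_true, Bool.false_eq_true, if_false]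
  generalize (if PySem.Str.startswith phone "84" = true
    then PySem.Str.slice phone (some (PySem.Str.len "84")) none
    else phone) = t
  simp only [pvScanOps, pvScanPrefixes]
  simp only [sw2 (p := "86") (h := by decide), sw2 (p := "96") (h := by decide), sw2 (p := "97") (h := by decide), sw2 (p := "98") (h := by decide), sw2 (p := "32") (h := by decide), sw2 (p := "33") (h := by decide), sw2 (p := "34") (h := by decide), sw2 (p := "35") (h := by decide), sw2 (p := "88") (h := by decide), sw2 (p := "91") (h := by decide), sw2 (p := "94") (h := by decide), sw2 (p := "83") (h := by decide), sw2 (p := "84") (h := by decide), sw2 (p := "85") (h := by decide), sw2 (p := "89") (h := by decide), sw2 (p := "90") (h := by decide), sw2 (p := "93") (h := by decide), sw2 (p := "70") (h := by decide), sw2 (p := "76") (h := by decide), sw2 (p := "77") (h := by decide)]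
  simp only [pv_push, Bool.false_eq_true, if_false]
  simp only [pv_match_getD, PySem.Dict.getD_eq_get?_getD, PySem.Dict.get?_mk_cons, pv_get?_nil]

set_option maxHeartbeats 1000000 in
theorem case_th (phone : String) : identify_operator "TH" phone = identify_operator_alt "TH" phone := by
  have e_US : (("US" : String) == "TH") = false := by decide
  have e_VN : (("VN" : String) == "TH") = false := by decide
  have e_TH : (("TH" : String) == "TH") = true := by decide
  simp only [identify_operator, identify_operator_alt, get_operators_by_country,
    COUNTRY_OPERATORS, OPERATOR_INDEX, PySem.Dict.get?_mk_cons,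
    e_US, e_VN, e_TH, if_true, Bool.false_eq_true, if_false]
  generalize (if PySem.Str.startswith phone "66" = true
    then PySem.Str.slice phone (some (PySem.Str.len "66")) none
    else phone) = t
  simp only [pvScanOps, pvScanPrefixes]
  simp only [sw2 (p := "81") (h := by decide), sw2 (p := "89") (h := by decide), sw2 (p := "90") (h := by decide), sw2 (p := "91") (h := by decide), sw2 (p := "92") (h := by decide), sw2 (p := "93") (h := by decide), sw2 (p := "82") (h := by decide), sw2 (p := "83") (h := by decide), sw2 (p := "84") (h := by decide), sw2 (p := "87") (h := by decide), sw2 (p := "88") (h := by decide)]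
  simp only [pv_push, Bool.false_eq_true, if_false]
  simp only [pv_match_getD, PySem.Dict.getD_eq_get?_getD, PySem.Dict.get?_mk_cons, pv_get?_nil]

set_option maxHeartbeats 1000000 in
theorem case_in_ (phone : String) : identify_operator "IN" phone = identify_operator_alt "IN" phone := by
  have e_US : (("US" : String) == "IN") = false := by decide
  have e_VN : (("VN" : String) == "IN") = false := by decide
  have e_TH : (("TH" : String) == "IN") = false := by decide
  have e_IN : (("IN" : String) == "IN") = true := by decide
  simp only [identify_operator, identify_operator_alt, get_operators_by_country,
    COUNTRY_OPERATORS, OPERATOR_INDEX, PySem.Dict.get?_mk_cons,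
    e_US, e_VN, e_TH, e_IN, if_true, Bool.false_eq_true, if_false]
  generalize (if PySem.Str.startswith phone "91" = true
    then PySem.Str.slice phone (some (PySem.Str.len "91")) none
    else phone) = t
  simp only [pvScanOps, pvScanPrefixes]
  simp only [sw2 (p := "60") (h := by decide), sw2 (p := "61") (h := by decide), sw2 (p := "62") (h := by decide), sw2 (p := "63") (h := by decide), sw2 (p := "70") (h := by decide), sw2 (p := "71") (h := by decide), sw2 (p := "72") (h := by decide), sw2 (p := "73") (h := by decide), sw2 (p := "78") (h := by decide), sw2 (p := "79") (h := by decide), sw2 (p := "80") (h := by decide), sw2 (p := "81") (h := by decide), sw2 (p := "82") (h := by decide), sw2 (p := "83") (h := by decide)]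
  simp only [pv_push, Bool.false_eq_true, if_false]
  simp only [pv_match_getD, PySem.Dict.getD_eq_get?_getD, PySem.Dict.get?_mk_cons, pv_get?_nil]

theorem case_other (cc phone : String) (hUS : "US" ≠ cc) (hVN : "VN" ≠ cc)
    (hTH : "TH" ≠ cc) (hIN : "IN" ≠ cc) :
    identify_operator cc phone = identify_operator_alt cc phone := by
  simp only [identify_operator, identify_operator_alt, get_operators_by_country,
    COUNTRY_OPERATORS, OPERATOR_INDEX, PySem.Dict.get?_mk_cons, beq_iff_eq,
    if_neg hUS, if_neg hVN, if_neg hTH, if_neg hIN]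
  rfl

-- ===== VERDICT (by name: the statement is the Claim_ definition above) =====
theorem identify_operator_spec : Claim_equal_identify_operator := by
  intro cc phone _
  unfold Spec_identify_operator
  by_cases hUS : "US" = cc
  · exact hUS ▸ case_us phone
  by_cases hVN : "VN" = cc
  · exact hVN ▸ case_vn phone
  by_cases hTH : "TH" = cc
  · exact hTH ▸ case_th phone
  by_cases hIN : "IN" = cc
  · exact hIN ▸ case_in_ phone
  exact case_other cc phone hUS hVN hTH hIN
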